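-- pv_equiv track=rewrite | github.com/WoosungMichael/Algorithm | Programmers/Python/Level_1/stringDesc.py | solution
-- ===== SOURCE A (Python) =====
-- def solution(s):
--     answer = ''
--     arr_l = []
--     arr_u = []
--     for i in s:
--         if(i.islower()):
--             arr_l.append(i)
--         else:
--             arr_u.append(i)
--     arr_l.sort(reverse=True)
--     arr_u.sort(reverse=True)
--     answer += ''.join(arr_l)
--     answer += ''.join(arr_u)
--     return answer
-- ===== SOURCE B (Python) =====
-- def solution(s):
--     # Counting sort over the fixed ASCII alphabet: emit each code's occurrences
--     # directly in descending order -- lowercase codes first, then all other codes.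
--     parts = []
--     for c in range(122, 96, -1):                 # 'z' down to 'a'
--         parts.append(chr(c) * s.count(chr(c)))
--     for c in range(127, -1, -1):                 # all other ASCII codes, descending
--         if not (97 <= c <= 122):
--             parts.append(chr(c) * s.count(chr(c)))
--     return ''.join(parts)
-- ===== Notes on version B (the rewrite author's own statement) =====
-- stated objective: alternative
-- what changed: Replaces partition-then-comparison-sort with a counting sort over the fixed 128-code ASCII alphabet: for each code in descending order (lowercase codes first, then the rest) it emits that character repeated by its count, so no sort is performed.
import Mathlib
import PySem

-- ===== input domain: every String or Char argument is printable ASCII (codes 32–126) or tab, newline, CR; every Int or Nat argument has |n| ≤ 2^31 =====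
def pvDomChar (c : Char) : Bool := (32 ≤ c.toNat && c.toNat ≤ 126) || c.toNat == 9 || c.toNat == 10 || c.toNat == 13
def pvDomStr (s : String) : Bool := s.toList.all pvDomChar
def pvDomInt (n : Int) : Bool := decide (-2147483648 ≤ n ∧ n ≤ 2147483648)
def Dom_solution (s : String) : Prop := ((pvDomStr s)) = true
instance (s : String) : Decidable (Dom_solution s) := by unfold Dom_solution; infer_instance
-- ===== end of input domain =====

-- B replaces A's partition-and-comparison-sort with a counting sort over the fixed ASCII alphabet (objective: alternative algorithm).

-- ===== PORT A =====
-- answer/arr_l/arr_u are built as List Char; ''.join and the final str are String.mk of the char list (exact).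
def solution (s : String) : String :=
  let p := s.toList.foldl
    (fun (acc : List Char × List Char) i =>
      if PySem.Chars.islower i then (acc.1 ++ [i], acc.2) else (acc.1, acc.2 ++ [i]))
    ([], [])
  let arrL := PySem.List.sorted p.1 (fun x => x) true
  let arrU := PySem.List.sorted p.2 (fun x => x) true
  String.mk (([] ++ arrL) ++ arrU)

-- ===== PORT B =====
-- chr(c) is Char.ofNat c.toNat; s.count(chr(c)) is a single-character substring count, which equals the
-- character count List.count (exact); chr(c) * k is List.replicate k (chr(c)) (exact).
def solution_alt (s : String) : String :=
  let cs := s.toList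
  let parts1 := (PySem.List.pyRange 122 96 (-1)).foldl
    (fun acc c => acc ++ List.replicate (cs.count (Char.ofNat c.toNat)) (Char.ofNat c.toNat)) []
  let parts := (PySem.List.pyRange 127 (-1) (-1)).foldl
    (fun acc c => if ¬ (97 ≤ c ∧ c ≤ 122) then
        acc ++ List.replicate (cs.count (Char.ofNat c.toNat)) (Char.ofNat c.toNat)
      else acc) parts1
  String.mk parts

-- ===== PRECONDITION & SPEC =====
def Spec_solution (s : String) (out : String) : Prop := out = solution_alt s
instance (s : String) (out : String) : Decidable (Spec_solution s out) := by unfold Spec_solution; infer_instance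

-- ===== CLAIM (what is proved, stated in full; the proofs are below) =====
def Claim_equal_solution : Prop := ∀ (s : String), Dom_solution s → Spec_solution s (solution s)

-- ===== LEMMAS AND PROOFS =====

theorem pvChar_toNat_ofNat (n : Nat) (h : n < 128) : (Char.ofNat n).toNat = n := by
  rw [Char.toNat_ofNat, if_pos (Or.inl (by omega))]

theorem pvChar_eq_of_toNat (a b : Char) (h : a.toNat = b.toNat) : a = b := by
  apply Char.ext; exact UInt32.toNat_inj.mp h

theorem pvChar_le_iff (a b : Char) : a ≤ b ↔ a.toNat ≤ b.toNat := by
  rw [Char.le_def]; exact UInt32.le_iff_toNat_le ..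

theorem pvIslower_iff (d : Char) : PySem.Chars.islower d = true ↔ (97 ≤ d.toNat ∧ d.toNat ≤ 122) := by
  have h1 : ('a' : Char).toNat = 97 := by decide
  have h2 : ('z' : Char).toNat = 122 := by decide
  unfold PySem.Chars.islower
  rw [Bool.and_eq_true, decide_eq_true_iff, decide_eq_true_iff, pvChar_le_iff, pvChar_le_iff,
    h1, h2]

-- A's partition loop: the pair accumulator collects the lowercase and the non-lowercase chars in order
theorem pvPartition (cs : List Char) (l u : List Char) :
    cs.foldl
      (fun (acc : List Char × List Char) i =>
        if PySem.Chars.islower i then (acc.1 ++ [i], acc.2) else (acc.1, acc.2 ++ [i]))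
      (l, u)
    = (l ++ cs.filter PySem.Chars.islower,
       u ++ cs.filter (fun x => ! PySem.Chars.islower x)) := by
  induction cs generalizing l u with
  | nil => simp
  | cons c t ih => by_cases h : PySem.Chars.islower c <;> simp [h, ih]

-- the block list built from a code list: each code's character replicated by its count in xs
def pvBlocks (xs : List Char) (codes : List Int) : List Char :=
  codes.flatMap (fun c => List.replicate (xs.count (Char.ofNat c.toNat)) (Char.ofNat c.toNat))

theorem pvCount_blocks (xs : List Char) (codes : List Int)
    (hv : ∀ c ∈ codes, 0 ≤ c ∧ c < 128) (hnd : codes.Nodup) (d : Char) :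
    (pvBlocks xs codes).count d = if (d.toNat : Int) ∈ codes then xs.count d else 0 := by
  induction codes with
  | nil => simp [pvBlocks]
  | cons c t ih =>
    have hc := hv c (by simp)
    have hch : (Char.ofNat c.toNat).toNat = c.toNat := pvChar_toNat_ofNat _ (by omega)
    have ht : ∀ x ∈ t, 0 ≤ x ∧ x < 128 := fun x hx => hv x (by simp [hx])
    have hndt : t.Nodup := hnd.of_cons
    have hrest : (List.flatMap
        (fun c => List.replicate (xs.count (Char.ofNat c.toNat)) (Char.ofNat c.toNat)) t)
        = pvBlocks xs t := rfl
    rw [pvBlocks, List.flatMap_cons, List.count_append, List.count_replicate, hrest,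
      ih ht hndt]
    by_cases hd : (d.toNat : Int) = c
    · have hde : Char.ofNat c.toNat = d := by
        apply pvChar_eq_of_toNat; rw [hch]; omega
      have hnm : (d.toNat : Int) ∉ t := by
        rw [hd]; exact (List.nodup_cons.mp hnd).1
      rw [if_pos (by simp [hde]), if_neg hnm, if_pos (by simp [hd]), hde]
      simp
    · have hne : ¬ (d = Char.ofNat c.toNat) := by
        intro he
        apply hd
        have : d.toNat = c.toNat := by rw [he, hch]
        rw [this]; omega
      rw [if_neg (by simp [beq_iff_eq]; exact fun h => hne h.symm)]
      simp [List.mem_cons, hd]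

theorem pvBlocks_perm (xs ys : List Char) (codes : List Int)
    (hv : ∀ c ∈ codes, 0 ≤ c ∧ c < 128) (hnd : codes.Nodup)
    (hcov : ∀ d : Char, d ∈ ys → (d.toNat : Int) ∈ codes)
    (hcnt : ∀ d : Char, (d.toNat : Int) ∈ codes → ys.count d = xs.count d) :
    (pvBlocks xs codes).Perm ys := by
  rw [List.perm_iff_count]
  intro d
  rw [pvCount_blocks xs codes hv hnd d]
  by_cases hm : (d.toNat : Int) ∈ codes
  · rw [if_pos hm, hcnt d hm]
  · rw [if_neg hm, Eq.comm, List.count_eq_zero]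
    exact fun h => hm (hcov d h)

theorem pvBlocks_pairwise (xs : List Char) (codes : List Int)
    (hv : ∀ c ∈ codes, 0 ≤ c ∧ c < 128)
    (hdesc : codes.Pairwise (fun a b => b < a)) :
    (pvBlocks xs codes).Pairwise (fun a b => b ≤ a) := by
  induction codes with
  | nil => simp [pvBlocks]
  | cons c t ih =>
    have hc := hv c (by simp)
    have ht : ∀ x ∈ t, 0 ≤ x ∧ x < 128 := fun x hx => hv x (by simp [hx])
    rw [pvBlocks, List.flatMap_cons, List.pairwise_append]
    refine ⟨?_, ih ht hdesc.of_cons, ?_⟩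
    · exact List.pairwise_replicate.mpr (Or.inr le_rfl)
    · intro a ha b hb
      have ha' : a = Char.ofNat c.toNat := (List.eq_of_mem_replicate ha)
      obtain ⟨c', hc't, hb'⟩ := List.mem_flatMap.mp hb
      have hb'' : b = Char.ofNat c'.toNat := List.eq_of_mem_replicate hb'
      have hc' := ht c' hc't
      have hlt : c' < c := (List.pairwise_cons.mp hdesc).1 c' hc't
      rw [pvChar_le_iff, ha', hb'', pvChar_toNat_ofNat _ (by omega),
        pvChar_toNat_ofNat _ (by omega)]
      omega

theorem pvSortedRev_eq_blocks (xs ys : List Char) (codes : List Int)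
    (hv : ∀ c ∈ codes, 0 ≤ c ∧ c < 128) (hnd : codes.Nodup)
    (hdesc : codes.Pairwise (fun a b => b < a))
    (hcov : ∀ d : Char, d ∈ ys → (d.toNat : Int) ∈ codes)
    (hcnt : ∀ d : Char, (d.toNat : Int) ∈ codes → ys.count d = xs.count d) :
    PySem.List.sorted ys (fun x => x) true = pvBlocks xs codes := by
  apply PySem.List.eq_of_perm_of_pairwise_le_of_injective
    (key := fun c : Char => -(c.toNat : Int))
  · intro a b h
    apply pvChar_eq_of_toNat
    have h' : -((a.toNat : Int)) = -((b.toNat : Int)) := h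
    omega
  · exact ((pvBlocks_perm xs ys codes hv hnd hcov hcnt).trans
      (PySem.List.sorted_perm ys (fun x => x) true).symm).symm
  · have := PySem.List.sorted_pairwise_rev ys (fun x : Char => x)
    exact this.imp (fun {a b} h => by
      have := (pvChar_le_iff b a).mp h; omega)
  · exact (pvBlocks_pairwise xs codes hv hdesc).imp (fun {a b} h => by
      have := (pvChar_le_iff b a).mp h; omega)

-- ===== VERDICT (by name: the statement is the Claim_ definition above) =====
set_option maxRecDepth 40000 in
theorem solution_spec : Claim_equal_solution := by
  intro s hdom
  have hbound : ∀ c ∈ s.toList, c.toNat < 128 := by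
    intro c hc
    unfold Dom_solution pvDomStr at hdom
    have := List.all_eq_true.mp hdom c hc
    unfold pvDomChar at this
    simp at this
    omega
  unfold Spec_solution solution solution_alt
  dsimp only
  rw [pvPartition, PySem.List.foldl_append_eq_flatMap, PySem.List.foldl_ite_eq_foldl_filter,
    PySem.List.foldl_append_eq_flatMap]
  dsimp only
  simp only [List.nil_append]
  apply congrArg
  have hlowdesc : (PySem.List.pyRange 122 96 (-1)).Pairwise (fun a b => b < a) := by decide
  have hrangedesc : (PySem.List.pyRange 127 (-1) (-1)).Pairwise (fun a b => b < a) := by decide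
  have hothdesc : ((PySem.List.pyRange 127 (-1) (-1)).filter
      (fun c => decide ¬(97 ≤ c ∧ c ≤ 122))).Pairwise (fun a b => b < a) :=
    List.Pairwise.sublist (List.filter_sublist) hrangedesc
  congr 1
  · -- lowercase side
    rw [pvSortedRev_eq_blocks s.toList (s.toList.filter PySem.Chars.islower)
      (PySem.List.pyRange 122 96 (-1))
      (fun c hc => by rw [PySem.List.mem_pyRange_neg_one] at hc; omega)
      (hlowdesc.imp (fun {a b} h => ne_of_gt h))
      hlowdesc
      (fun d hd => by
        have := (pvIslower_iff d).mp (List.mem_filter.mp hd).2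
        rw [PySem.List.mem_pyRange_neg_one]; omega)
      (fun d hd => by
        rw [PySem.List.mem_pyRange_neg_one] at hd
        exact List.count_filter ((pvIslower_iff d).mpr (by omega)))]
    rfl
  · -- other side
    rw [pvSortedRev_eq_blocks s.toList (s.toList.filter (fun x => ! PySem.Chars.islower x))
      ((PySem.List.pyRange 127 (-1) (-1)).filter (fun c => decide ¬(97 ≤ c ∧ c ≤ 122)))
      (fun c hc => by
        have := (List.mem_filter.mp hc).1
        rw [PySem.List.mem_pyRange_neg_one] at this; omega)
      (hothdesc.imp (fun {a b} h => ne_of_gt h))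
      hothdesc
      (fun d hd => by
        obtain ⟨hmem, hlo⟩ := List.mem_filter.mp hd
        have hb := hbound d hmem
        have hnl : ¬ (97 ≤ d.toNat ∧ d.toNat ≤ 122) := by
          intro h
          rw [(pvIslower_iff d).mpr h] at hlo
          simp at hlo
        refine List.mem_filter.mpr ⟨?_, by simp; omega⟩
        rw [PySem.List.mem_pyRange_neg_one]; omega)
      (fun d hd => by
        obtain ⟨hmem, hcond⟩ := List.mem_filter.mp hd
        rw [PySem.List.mem_pyRange_neg_one] at hmem
        simp at hcond
        have hfalse : PySem.Chars.islower d = false := by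
          rw [← Bool.not_eq_true]
          intro h
          have := (pvIslower_iff d).mp h
          omega
        exact List.count_filter (by rw [hfalse]; rfl))]
    rfl
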